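-- pv_equiv track=rewrite | github.com/Jesus-ggez/tc-ui | _stubs/fmtr.py | firs_alnum
-- ===== SOURCE A (Python) =====
-- def firs_alnum(s: str) -> str:
--     new_s: str = ''
--
--     for char in s:
--         if char.isalnum() or char == '_':
--             new_s += char
--             continue
--
--         if new_s:
--             break
--
--     return new_s
-- ===== SOURCE B (Python) =====
-- def firs_alnum(s: str) -> str:
--     sep_blanked = ''.join(c if (c.isalnum() or c == '_') else ' ' for c in s)
--     parts = sep_blanked.split()
--     return parts[0] if parts else ''
-- ===== Notes on version B (the rewrite author's own statement) =====
-- stated objective: alternative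
-- what changed: Instead of A's single stateful scan with an accumulator-as-started-flag and mid-loop break, B blanks every non-word character to a space, tokenizes the result with str.split(), and returns the first token (or '').
import Mathlib
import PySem

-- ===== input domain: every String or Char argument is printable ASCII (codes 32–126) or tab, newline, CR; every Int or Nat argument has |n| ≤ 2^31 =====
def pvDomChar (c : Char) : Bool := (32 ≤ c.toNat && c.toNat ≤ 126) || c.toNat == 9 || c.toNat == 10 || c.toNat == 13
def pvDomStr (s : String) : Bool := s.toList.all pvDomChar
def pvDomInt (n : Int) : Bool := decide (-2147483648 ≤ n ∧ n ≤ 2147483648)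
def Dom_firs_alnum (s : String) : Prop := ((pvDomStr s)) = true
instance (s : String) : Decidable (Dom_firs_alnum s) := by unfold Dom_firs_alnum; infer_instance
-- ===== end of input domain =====

-- B replaces A's single stateful scan (accumulator doubling as a started-flag with a mid-loop
-- break) by blanking every non-word char to a space, tokenizing with str.split(), and returning
-- the first token; objective: alternative, same cost.

-- the shared character predicate: char.isalnum() or char == '_'
def faPred (c : Char) : Bool := PySem.Chars.isalnum c || c == '_'

-- ===== PORT A =====
-- the loop over s with state new_s (early break once new_s is nonempty and a separator is seen)
def faLoopA : List Char → List Char → List Char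
  | [], acc => acc
  | c :: cs, acc =>
    if faPred c then faLoopA cs (acc ++ [c])
    else if acc ≠ [] then acc
    else faLoopA cs acc

def firs_alnum (s : String) : String := String.mk (faLoopA s.toList [])

-- ===== PORT B =====
def firs_alnum_alt (s : String) : String :=
  -- sep_blanked = blank every non-word char; parts = sep_blanked.split(); parts[0] if parts else ''
  match PySem.Chars.split₀ (s.toList.map (fun c => if faPred c then c else ' ')) with
  | [] => ""
  | p :: _ => String.mk p

-- ===== PRECONDITION & SPEC =====
def Spec_firs_alnum (s : String) (out : String) : Prop := out = firs_alnum_alt s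
instance (s : String) (out : String) : Decidable (Spec_firs_alnum s out) := by unfold Spec_firs_alnum; infer_instance

-- ===== CLAIM (what is proved, stated in full; the proofs are below) =====
def Claim_equal_firs_alnum : Prop := ∀ (s : String), Dom_firs_alnum s → Spec_firs_alnum s (firs_alnum s)

-- ===== LEMMAS AND PROOFS =====

-- word characters are never whitespace
theorem faPred_not_space (c : Char) (h : faPred c = true) : PySem.Chars.isspace c = false := by
  have hn : (65 ≤ c.toNat ∧ c.toNat ≤ 90) ∨ (97 ≤ c.toNat ∧ c.toNat ≤ 122) ∨
      (48 ≤ c.toNat ∧ c.toNat ≤ 57) ∨ c.toNat = 95 := by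
    simp only [faPred, PySem.Chars.isalnum, PySem.Chars.isalpha, PySem.Chars.isdigit,
      PySem.Chars.isupper, PySem.Chars.islower, Bool.or_eq_true, Bool.and_eq_true,
      decide_eq_true_eq, beq_iff_eq, Char.le_def, UInt32.le_iff_toNat_le] at h
    rcases h with (((⟨h1, h2⟩ | ⟨h1, h2⟩) | ⟨h1, h2⟩) | h1)
    · exact Or.inl ⟨h1, h2⟩
    · exact Or.inr (Or.inl ⟨h1, h2⟩)
    · exact Or.inr (Or.inr (Or.inl ⟨h1, h2⟩))
    · subst h1; exact Or.inr (Or.inr (Or.inr rfl))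
  simp only [PySem.Chars.isspace, Bool.or_eq_false_iff, Bool.and_eq_false_iff,
    decide_eq_false_iff_not]
  unfold Char.toNat at hn ⊢
  omega

-- once the accumulator is nonempty, A's loop just appends the leading pred-run
theorem faLoopA_collect (l acc : List Char) (h : acc ≠ []) :
    faLoopA l acc = acc ++ l.takeWhile faPred := by
  induction l generalizing acc with
  | nil => simp [faLoopA]
  | cons c cs ih =>
    by_cases hc : faPred c
    · simp [faLoopA, hc, ih (acc ++ [c]) (by simp)]
    · simp [faLoopA, hc, h, List.takeWhile_cons]

-- A's loop computes the first word run after the leading separator run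
theorem faLoopA_eq (l : List Char) :
    faLoopA l [] = (l.dropWhile (fun c => !faPred c)).takeWhile faPred := by
  induction l with
  | nil => simp [faLoopA]
  | cons c cs ih =>
    by_cases hc : faPred c
    · simp [faLoopA, hc, List.dropWhile_cons, List.takeWhile_cons,
        faLoopA_collect cs [c] (by simp)]
    · simp [faLoopA, hc, List.dropWhile_cons, ih]

-- split₀.go's accumulator is prepended reversed
theorem go_acc (l cur : List Char) (acc : List (List Char)) :
    PySem.Chars.split₀.go l cur acc = acc.reverse ++ PySem.Chars.split₀.go l cur [] := by
  induction l generalizing cur acc with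
  | nil =>
    by_cases hc : cur.isEmpty
    · simp only [PySem.Chars.split₀.go, hc, if_true]
      simp
    · simp only [PySem.Chars.split₀.go, hc, Bool.false_eq_true, if_false]
      simp
  | cons c cs ih =>
    simp only [PySem.Chars.split₀.go]
    by_cases hs : PySem.Chars.isspace c
    · by_cases hc : cur.isEmpty
      · simp only [hs, hc, if_true]
        exact ih [] acc
      · simp only [hs, hc, if_true, Bool.false_eq_true, if_false]
        rw [ih [] (cur.reverse :: acc), ih [] [cur.reverse]]
        simp
    · simp only [hs, Bool.false_eq_true, if_false]
      exact ih (c :: cur) acc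

-- once cur is nonempty, the head of go's result is cur.reverse ++ the current whitespace-free run
theorem go_head (l cur : List Char) (h : cur ≠ []) :
    (PySem.Chars.split₀.go l cur []).headD [] =
      cur.reverse ++ l.takeWhile (fun c => !PySem.Chars.isspace c) := by
  induction l generalizing cur with
  | nil =>
    simp [PySem.Chars.split₀.go, List.isEmpty_iff, h]
  | cons c cs ih =>
    by_cases hs : PySem.Chars.isspace c
    · rw [PySem.Chars.split₀.go]
      simp only [hs, if_true, List.isEmpty_iff, h, if_false]
      rw [go_acc]
      simp [List.takeWhile_cons, hs]
    · rw [PySem.Chars.split₀.go]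
      simp only [hs, Bool.false_eq_true, if_false]
      rw [ih (c :: cur) (by simp)]
      simp [List.takeWhile_cons, hs]

-- the first token of split() is the first whitespace-free run after leading whitespace
theorem split₀_head (l : List Char) :
    (PySem.Chars.split₀ l).headD [] =
      (l.dropWhile (fun c => PySem.Chars.isspace c)).takeWhile (fun c => !PySem.Chars.isspace c) := by
  induction l with
  | nil => simp [PySem.Chars.split₀, PySem.Chars.split₀.go]
  | cons c cs ih =>
    by_cases hs : PySem.Chars.isspace c
    · rw [PySem.Chars.split₀] at ih ⊢
      rw [PySem.Chars.split₀.go]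
      simp only [hs, if_true, List.isEmpty_nil, ite_true]
      simpa [List.dropWhile_cons, hs] using ih
    · rw [PySem.Chars.split₀, PySem.Chars.split₀.go]
      simp only [hs, Bool.false_eq_true, if_false]
      rw [go_head cs [c] (by simp)]
      simp [List.dropWhile_cons, List.takeWhile_cons, hs]

-- on a word run, the blanked list's whitespace-free prefix is the faPred prefix
theorem blanked_take (l : List Char) :
    (l.map (fun c => if faPred c then c else ' ')).takeWhile (fun c => !PySem.Chars.isspace c) =
      l.takeWhile faPred := by
  induction l with
  | nil => simp
  | cons c cs ih =>
    by_cases h : faPred c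
    · simp [List.takeWhile_cons, h, faPred_not_space c h, ih]
    · simp [List.takeWhile_cons, h]
      decide

theorem blanked_drop_take (l : List Char) :
    ((l.map (fun c => if faPred c then c else ' ')).dropWhile
        (fun c => PySem.Chars.isspace c)).takeWhile (fun c => !PySem.Chars.isspace c) =
      (l.dropWhile (fun c => !faPred c)).takeWhile faPred := by
  induction l with
  | nil => simp
  | cons c cs ih =>
    by_cases h : faPred c
    · have hs : PySem.Chars.isspace c = false := faPred_not_space c h
      simp [List.dropWhile_cons, List.takeWhile_cons, h, hs, blanked_take cs]
    · simp only [List.map_cons, List.dropWhile_cons, h]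
      simpa [h] using ih

-- ===== VERDICT (by name: the statement is the Claim_ definition above) =====
theorem firs_alnum_spec : Claim_equal_firs_alnum := by
  intro s _
  unfold Spec_firs_alnum firs_alnum firs_alnum_alt
  rw [faLoopA_eq, ← blanked_drop_take, ← split₀_head]
  cases hp : PySem.Chars.split₀ (s.toList.map (fun c => if faPred c then c else ' ')) with
  | nil => rfl
  | cons p rest => rfl
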